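-- pv_equiv track=rewrite | github.com/Sazz-n/MK8Developers | cogs/peperon/makeScoreTable.py | ranksFormCheck
-- ===== SOURCE A (Python) =====
-- def ranksFormCheck(ranksForm):
--     ranksForm = ranksForm.replace("a","10").replace("b","11").replace("c","12")
--     ranksCheckFlag = True
--     #ポイントの値チェック
--     ranks = []
--     if ranksForm.isdigit():
--         if 6 <= len(ranksForm) and len(ranksForm) <= 9:
--             digit2Num = len(ranksForm)-6
--             for i in range(6-digit2Num):
--                 ranks.append(int(ranksForm[i]))
--             for i in range(digit2Num):
--                 ranks.append(int(ranksForm[6-digit2Num+2*i] + ranksForm[6-digit2Num+2*i+1]))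
--
--             if len(ranks) != 6:
--                 ranksCheckFlag = False
--             for i in range(len(ranks)):
--                 if ranks[i] <= 0 or 13 <= ranks[i]:
--                     ranksCheckFlag = False
--                 for j in range(i+1,len(ranks)):
--                     if ranks[i] >= ranks[j]:
--                         ranksCheckFlag = False
--         else:
--             ranksCheckFlag = False
--     else:
--         ranksCheckFlag = False
--     return ranksCheckFlag
-- ===== SOURCE B (Python) =====
-- def ranksFormCheck(ranksForm):
--     s = ranksForm.replace("a", "10").replace("b", "11").replace("c", "12")
--     if not s.isdigit():
--         return False
--     n = len(s)
--     if not (6 <= n <= 9):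
--         return False
--     d = n - 6
--     head, tail = s[:6 - d], s[6 - d:]
--     ranks = [int(ch) for ch in head] + [int(tail[j:j + 2]) for j in range(0, 2 * d, 2)]
--     return ranks == sorted(ranks) and len(set(ranks)) == 6 and all(1 <= r <= 12 for r in ranks)
-- ===== Notes on version B (the rewrite author's own statement) =====
-- stated objective: idiomatic
-- what changed: A's index-arithmetic parsing and flag-accumulator validation with a nested O(k^2) pairwise loop are replaced by slice/comprehension parsing and a single sorted/set/bounds check (ranks == sorted(ranks), len(set(ranks)) == 6, all in 1..12).
import Mathlib
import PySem

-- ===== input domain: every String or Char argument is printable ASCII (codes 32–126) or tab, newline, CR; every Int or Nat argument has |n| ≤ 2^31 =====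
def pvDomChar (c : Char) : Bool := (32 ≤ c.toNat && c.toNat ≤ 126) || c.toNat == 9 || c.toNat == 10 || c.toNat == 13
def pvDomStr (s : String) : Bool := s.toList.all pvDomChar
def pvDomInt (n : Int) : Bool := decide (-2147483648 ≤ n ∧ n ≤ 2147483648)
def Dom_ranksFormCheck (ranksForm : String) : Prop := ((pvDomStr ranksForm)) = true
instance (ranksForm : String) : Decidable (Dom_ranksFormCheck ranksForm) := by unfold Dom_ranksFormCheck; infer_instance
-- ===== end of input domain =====

-- B replaces A's flag-and-nested-pairwise validation by a sorted/set/bounds check and A's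
-- index-arithmetic parsing by slices; same return value everywhere (objective: idiomatic, not faster).

-- ===== PORT A =====
-- A's body after the replace chain, transliterated over the character list.
def pvCoreA (l : List Char) : Bool :=
  if PySem.Chars.strIsdigit l then
    if 6 ≤ PySem.Chars.len l ∧ PySem.Chars.len l ≤ 9 then
      let d : Int := PySem.Chars.len l - 6
      let ranks : List Int :=
        (PySem.List.pyRange 0 (6 - d) 1).foldl
          (fun acc i => acc ++ [(PySem.Int.ofChars? [PySem.List.pyGetD l i ' ']).getD 0]) []
      let ranks : List Int :=
        (PySem.List.pyRange 0 d 1).foldl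
          (fun acc i => acc ++ [(PySem.Int.ofChars?
              [PySem.List.pyGetD l (6 - d + 2 * i) ' ',
               PySem.List.pyGetD l (6 - d + 2 * i + 1) ' ']).getD 0]) ranks
      let flag : Bool := true
      let flag : Bool := if ranks.length ≠ 6 then false else flag
      let flag : Bool :=
        (PySem.List.pyRange 0 (PySem.List.len ranks) 1).foldl
          (fun f i =>
            let ri := PySem.List.pyGetD ranks i 0
            let f := if ri ≤ 0 ∨ 13 ≤ ri then false else f
            (PySem.List.pyRange (i + 1) (PySem.List.len ranks) 1).foldl
              (fun f2 j => if ri ≥ PySem.List.pyGetD ranks j 0 then false else f2) f)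
          flag
      flag
    else false
  else false

def ranksFormCheck (ranksForm : String) : Bool :=
  pvCoreA (PySem.Str.replace (PySem.Str.replace (PySem.Str.replace ranksForm "a" "10")
    "b" "11") "c" "12").toList

-- ===== PORT B =====
-- B's body after the replace chain (Source B): guards, slice-based parsing, sorted/set/bounds check.
def pvCoreB (l : List Char) : Bool :=
  if !PySem.Chars.strIsdigit l then false
  else
    let n : Int := PySem.Chars.len l
    if !(decide (6 ≤ n) && decide (n ≤ 9)) then false
    else
      let d : Int := n - 6
      let head := PySem.List.slice l none (some (6 - d))
      let tail := PySem.List.slice l (some (6 - d)) none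
      let ranks : List Int :=
        head.map (fun ch => (PySem.Int.ofChars? [ch]).getD 0) ++
        (PySem.List.pyRange 0 (2 * d) 2).map
          (fun j => (PySem.Int.ofChars? (PySem.List.slice tail (some j) (some (j + 2)))).getD 0)
      decide (ranks = PySem.List.sorted ranks (fun x => x) false) &&
      ((PySem.Set.ofList ranks).length == 6) &&
      ranks.all (fun r => decide (1 ≤ r) && decide (r ≤ 12))

def ranksFormCheck_alt (ranksForm : String) : Bool :=
  pvCoreB (PySem.Str.replace (PySem.Str.replace (PySem.Str.replace ranksForm "a" "10")
    "b" "11") "c" "12").toList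

-- ===== PRECONDITION & SPEC =====
def Spec_ranksFormCheck (ranksForm : String) (out : Bool) : Prop := out = ranksFormCheck_alt ranksForm
instance (ranksForm : String) (out : Bool) : Decidable (Spec_ranksFormCheck ranksForm out) := by unfold Spec_ranksFormCheck; infer_instance

-- ===== CLAIM (what is proved, stated in full; the proofs are below) =====
def Claim_equal_ranksFormCheck : Prop := ∀ (ranksForm : String), Dom_ranksFormCheck ranksForm → Spec_ranksFormCheck ranksForm (ranksFormCheck ranksForm)

-- ===== LEMMAS AND PROOFS =====

-- Python `ranks == sorted(ranks)` is exactly "ranks is weakly increasing".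
lemma sorted_self_iff (xs : List Int) :
    xs = PySem.List.sorted xs (fun x => x) ↔ xs.Pairwise (· ≤ ·) := by
  constructor
  · intro h
    have h2 := PySem.List.sorted_pairwise xs (fun x => x)
    rw [← h] at h2
    exact h2
  · intro h
    exact (PySem.List.sorted_eq_self_of_pairwise xs (fun x => x) h).symm

-- Python `len(set(xs)) == len(xs)` is exactly "xs has no duplicates".
lemma ofList_len_iff (xs : List Int) :
    ((PySem.Set.ofList xs).length = xs.length) ↔ xs.Nodup := by
  constructor
  · intro h
    have hsub : (PySem.Set.ofList xs).toFinset = xs.toFinset := by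
      ext x; simp [PySem.Set.mem_ofList]
    have hc : xs.toFinset.card = xs.length := by
      rw [← hsub, List.toFinset_card_of_nodup (PySem.Set.nodup_ofList (xs := xs)), h]
    rw [List.card_toFinset] at hc
    rw [← (List.dedup_sublist xs).eq_of_length hc]
    exact List.nodup_dedup xs
  · intro h
    rw [PySem.Set.ofList_eq_self_of_nodup xs h]

lemma ofList_len6_iff (r0 r1 r2 r3 r4 r5 : Int) :
    ((PySem.Set.ofList [r0,r1,r2,r3,r4,r5]).length = 6) ↔
      ([r0,r1,r2,r3,r4,r5] : List Int).Nodup := by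
  simpa using ofList_len_iff [r0,r1,r2,r3,r4,r5]

set_option maxHeartbeats 2000000 in
lemma pvCase6 (c0 c1 c2 c3 c4 c5 : Char)
    (hd : PySem.Chars.strIsdigit [c0,c1,c2,c3,c4,c5] = true) :
    pvCoreA [c0,c1,c2,c3,c4,c5] = pvCoreB [c0,c1,c2,c3,c4,c5] := by
  simp only [pvCoreA, pvCoreB, hd, PySem.Chars.len_eq, List.length_cons, List.length_nil]
  norm_num
  simp only [show PySem.List.pyRange 0 6 1 = [0,1,2,3,4,5] from by decide,
      show PySem.List.pyRange 0 0 1 = ([] : List Int) from by decide,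
      show PySem.List.pyRange 0 0 2 = ([] : List Int) from by decide]
  simp only [List.map, PySem.List.pyGetD_ofNat']
  norm_num [PySem.List.pyGetD_ofNat', PySem.List.slice_to, PySem.List.slice_from, PySem.List.slice_toNat]
  norm_num [show PySem.List.pyRange 0 6 1 = [0,1,2,3,4,5] from by decide,
      show PySem.List.pyRange 1 6 1 = [1,2,3,4,5] from by decide,
      show PySem.List.pyRange 2 6 1 = [2,3,4,5] from by decide,
      show PySem.List.pyRange 3 6 1 = [3,4,5] from by decide,
      show PySem.List.pyRange 4 6 1 = [4,5] from by decide,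
      show PySem.List.pyRange 5 6 1 = [5] from by decide,
      show PySem.List.pyRange 6 6 1 = ([] : List Int) from by decide,
      show Int.toNat 0 = 0 from rfl,
      show Int.toNat 2 = 2 from rfl,
      show Int.toNat 6 = 6 from rfl,
      List.foldl, PySem.List.pyGetD_ofNat', List.take_succ_cons,
      List.take_zero, List.drop_succ_cons, List.drop_zero, List.all_cons, List.all_nil,
      Function.comp,
      show ∀ (a b c d e f : ℤ), [a,b,c,d,e,f].getD 0 0 = a from fun _ _ _ _ _ _ => rfl,
      show ∀ (a b c d e f : ℤ), [a,b,c,d,e,f].getD 1 0 = b from fun _ _ _ _ _ _ => rfl,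
      show ∀ (a b c d e f : ℤ), [a,b,c,d,e,f].getD 2 0 = c from fun _ _ _ _ _ _ => rfl,
      show ∀ (a b c d e f : ℤ), [a,b,c,d,e,f].getD 3 0 = d from fun _ _ _ _ _ _ => rfl,
      show ∀ (a b c d e f : ℤ), [a,b,c,d,e,f].getD 4 0 = e from fun _ _ _ _ _ _ => rfl,
      show ∀ (a b c d e f : ℤ), [a,b,c,d,e,f].getD 5 0 = f from fun _ _ _ _ _ _ => rfl]
  rw [Bool.eq_iff_iff]
  simp only [Bool.and_eq_true, Bool.not_eq_true', decide_eq_true_iff, decide_eq_false_iff_not,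
    beq_iff_eq, sorted_self_iff, ofList_len6_iff, List.pairwise_cons, List.nodup_cons,
    List.mem_cons, List.not_mem_nil, List.nodup_nil, forall_eq_or_imp,
    forall_eq, or_false, List.forall_mem_nil, not_or]
  norm_num
  all_goals omega

set_option maxHeartbeats 2000000 in
lemma pvCase7 (c0 c1 c2 c3 c4 c5 c6 : Char)
    (hd : PySem.Chars.strIsdigit [c0,c1,c2,c3,c4,c5,c6] = true) :
    pvCoreA [c0,c1,c2,c3,c4,c5,c6] = pvCoreB [c0,c1,c2,c3,c4,c5,c6] := by
  simp only [pvCoreA, pvCoreB, hd, PySem.Chars.len_eq, List.length_cons, List.length_nil]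
  norm_num
  simp only [show PySem.List.pyRange 0 5 1 = [0,1,2,3,4] from by decide,
      show PySem.List.pyRange 0 1 1 = [0] from by decide,
      show PySem.List.pyRange 0 2 2 = [0] from by decide]
  simp only [List.map, PySem.List.pyGetD_ofNat']
  norm_num [PySem.List.pyGetD_ofNat', PySem.List.slice_to, PySem.List.slice_from, PySem.List.slice_toNat]
  norm_num [show PySem.List.pyRange 0 6 1 = [0,1,2,3,4,5] from by decide,
      show PySem.List.pyRange 1 6 1 = [1,2,3,4,5] from by decide,
      show PySem.List.pyRange 2 6 1 = [2,3,4,5] from by decide,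
      show PySem.List.pyRange 3 6 1 = [3,4,5] from by decide,
      show PySem.List.pyRange 4 6 1 = [4,5] from by decide,
      show PySem.List.pyRange 5 6 1 = [5] from by decide,
      show PySem.List.pyRange 6 6 1 = ([] : List Int) from by decide,
      show Int.toNat 0 = 0 from rfl,
      show Int.toNat 2 = 2 from rfl,
      show Int.toNat 5 = 5 from rfl,
      List.foldl, PySem.List.pyGetD_ofNat', List.take_succ_cons,
      List.take_zero, List.drop_succ_cons, List.drop_zero, List.all_cons, List.all_nil,
      Function.comp,
      show ∀ (a b c d e f : ℤ), [a,b,c,d,e,f].getD 0 0 = a from fun _ _ _ _ _ _ => rfl,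
      show ∀ (a b c d e f : ℤ), [a,b,c,d,e,f].getD 1 0 = b from fun _ _ _ _ _ _ => rfl,
      show ∀ (a b c d e f : ℤ), [a,b,c,d,e,f].getD 2 0 = c from fun _ _ _ _ _ _ => rfl,
      show ∀ (a b c d e f : ℤ), [a,b,c,d,e,f].getD 3 0 = d from fun _ _ _ _ _ _ => rfl,
      show ∀ (a b c d e f : ℤ), [a,b,c,d,e,f].getD 4 0 = e from fun _ _ _ _ _ _ => rfl,
      show ∀ (a b c d e f : ℤ), [a,b,c,d,e,f].getD 5 0 = f from fun _ _ _ _ _ _ => rfl]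
  rw [Bool.eq_iff_iff]
  simp only [Bool.and_eq_true, Bool.not_eq_true', decide_eq_true_iff, decide_eq_false_iff_not,
    beq_iff_eq, sorted_self_iff, ofList_len6_iff, List.pairwise_cons, List.nodup_cons,
    List.mem_cons, List.not_mem_nil, List.nodup_nil, forall_eq_or_imp,
    forall_eq, or_false, not_or]
  norm_num
  all_goals omega

set_option maxHeartbeats 2000000 in
lemma pvCase8 (c0 c1 c2 c3 c4 c5 c6 c7 : Char)
    (hd : PySem.Chars.strIsdigit [c0,c1,c2,c3,c4,c5,c6,c7] = true) :
    pvCoreA [c0,c1,c2,c3,c4,c5,c6,c7] = pvCoreB [c0,c1,c2,c3,c4,c5,c6,c7] := by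
  simp only [pvCoreA, pvCoreB, hd, PySem.Chars.len_eq, List.length_cons, List.length_nil]
  norm_num
  simp only [show PySem.List.pyRange 0 4 1 = [0,1,2,3] from by decide,
      show PySem.List.pyRange 0 2 1 = [0,1] from by decide,
      show PySem.List.pyRange 0 4 2 = [0,2] from by decide]
  simp only [List.map, PySem.List.pyGetD_ofNat']
  norm_num [PySem.List.pyGetD_ofNat', PySem.List.slice_to, PySem.List.slice_from, PySem.List.slice_toNat]
  norm_num [show PySem.List.pyRange 0 6 1 = [0,1,2,3,4,5] from by decide,
      show PySem.List.pyRange 1 6 1 = [1,2,3,4,5] from by decide,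
      show PySem.List.pyRange 2 6 1 = [2,3,4,5] from by decide,
      show PySem.List.pyRange 3 6 1 = [3,4,5] from by decide,
      show PySem.List.pyRange 4 6 1 = [4,5] from by decide,
      show PySem.List.pyRange 5 6 1 = [5] from by decide,
      show PySem.List.pyRange 6 6 1 = ([] : List Int) from by decide,
      show Int.toNat 0 = 0 from rfl,
      show Int.toNat 2 = 2 from rfl,
      show Int.toNat 4 = 4 from rfl,
      List.foldl, PySem.List.pyGetD_ofNat', List.take_succ_cons,
      List.take_zero, List.drop_succ_cons, List.drop_zero, List.all_cons, List.all_nil,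
      Function.comp,
      show ∀ (a b c d e f : ℤ), [a,b,c,d,e,f].getD 0 0 = a from fun _ _ _ _ _ _ => rfl,
      show ∀ (a b c d e f : ℤ), [a,b,c,d,e,f].getD 1 0 = b from fun _ _ _ _ _ _ => rfl,
      show ∀ (a b c d e f : ℤ), [a,b,c,d,e,f].getD 2 0 = c from fun _ _ _ _ _ _ => rfl,
      show ∀ (a b c d e f : ℤ), [a,b,c,d,e,f].getD 3 0 = d from fun _ _ _ _ _ _ => rfl,
      show ∀ (a b c d e f : ℤ), [a,b,c,d,e,f].getD 4 0 = e from fun _ _ _ _ _ _ => rfl,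
      show ∀ (a b c d e f : ℤ), [a,b,c,d,e,f].getD 5 0 = f from fun _ _ _ _ _ _ => rfl]
  rw [Bool.eq_iff_iff]
  simp only [Bool.and_eq_true, Bool.not_eq_true', decide_eq_true_iff, decide_eq_false_iff_not,
    beq_iff_eq, sorted_self_iff, ofList_len6_iff, List.pairwise_cons, List.nodup_cons,
    List.mem_cons, List.not_mem_nil, List.nodup_nil, forall_eq_or_imp,
    forall_eq, or_false, not_or]
  norm_num
  all_goals omega

set_option maxHeartbeats 2000000 in
lemma pvCase9 (c0 c1 c2 c3 c4 c5 c6 c7 c8 : Char)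
    (hd : PySem.Chars.strIsdigit [c0,c1,c2,c3,c4,c5,c6,c7,c8] = true) :
    pvCoreA [c0,c1,c2,c3,c4,c5,c6,c7,c8] = pvCoreB [c0,c1,c2,c3,c4,c5,c6,c7,c8] := by
  simp only [pvCoreA, pvCoreB, hd, PySem.Chars.len_eq, List.length_cons, List.length_nil]
  norm_num
  simp only [show PySem.List.pyRange 0 3 1 = [0,1,2] from by decide,
      show PySem.List.pyRange 0 6 2 = [0,2,4] from by decide]
  simp only [List.map, PySem.List.pyGetD_ofNat']
  norm_num [PySem.List.pyGetD_ofNat', PySem.List.slice_to, PySem.List.slice_from, PySem.List.slice_toNat]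
  norm_num [show PySem.List.pyRange 0 6 1 = [0,1,2,3,4,5] from by decide,
      show PySem.List.pyRange 1 6 1 = [1,2,3,4,5] from by decide,
      show PySem.List.pyRange 2 6 1 = [2,3,4,5] from by decide,
      show PySem.List.pyRange 3 6 1 = [3,4,5] from by decide,
      show PySem.List.pyRange 4 6 1 = [4,5] from by decide,
      show PySem.List.pyRange 5 6 1 = [5] from by decide,
      show PySem.List.pyRange 6 6 1 = ([] : List Int) from by decide,
      show Int.toNat 0 = 0 from rfl,
      show Int.toNat 2 = 2 from rfl,
      show Int.toNat 3 = 3 from rfl,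
      show Int.toNat 4 = 4 from rfl,
      show Int.toNat 6 = 6 from rfl,
      List.foldl, PySem.List.pyGetD_ofNat', List.take_succ_cons,
      List.take_zero, List.drop_succ_cons, List.drop_zero, List.all_cons, List.all_nil,
      Function.comp,
      show ∀ (a b c d e f : ℤ), [a,b,c,d,e,f].getD 0 0 = a from fun _ _ _ _ _ _ => rfl,
      show ∀ (a b c d e f : ℤ), [a,b,c,d,e,f].getD 1 0 = b from fun _ _ _ _ _ _ => rfl,
      show ∀ (a b c d e f : ℤ), [a,b,c,d,e,f].getD 2 0 = c from fun _ _ _ _ _ _ => rfl,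
      show ∀ (a b c d e f : ℤ), [a,b,c,d,e,f].getD 3 0 = d from fun _ _ _ _ _ _ => rfl,
      show ∀ (a b c d e f : ℤ), [a,b,c,d,e,f].getD 4 0 = e from fun _ _ _ _ _ _ => rfl,
      show ∀ (a b c d e f : ℤ), [a,b,c,d,e,f].getD 5 0 = f from fun _ _ _ _ _ _ => rfl]
  rw [Bool.eq_iff_iff]
  simp only [Bool.and_eq_true, Bool.not_eq_true', decide_eq_true_iff, decide_eq_false_iff_not,
    beq_iff_eq, sorted_self_iff, ofList_len6_iff, List.pairwise_cons, List.nodup_cons,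
    List.mem_cons, List.not_mem_nil, List.nodup_nil, forall_eq_or_imp,
    forall_eq, or_false, not_or]
  norm_num
  all_goals omega

-- A and B agree on any character list fed to the common bodies.
set_option maxHeartbeats 2000000 in
lemma core_eq (l : List Char) : pvCoreA l = pvCoreB l := by
  cases hd : PySem.Chars.strIsdigit l with
  | false => simp [pvCoreA, pvCoreB, hd]
  | true =>
    by_cases hlen : 6 ≤ PySem.Chars.len l ∧ PySem.Chars.len l ≤ 9
    · have h69 : 6 ≤ l.length ∧ l.length ≤ 9 := by
        rw [PySem.Chars.len_eq] at hlen
        omega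
      rcases l with _|⟨c0,_|⟨c1,_|⟨c2,_|⟨c3,_|⟨c4,_|⟨c5,_|⟨c6,_|⟨c7,_|⟨c8,_|⟨c9,t⟩⟩⟩⟩⟩⟩⟩⟩⟩⟩ <;>
        simp only [List.length_cons, List.length_nil] at h69 <;>
        first
        | omega
        | exact pvCase6 _ _ _ _ _ _ hd
        | exact pvCase7 _ _ _ _ _ _ _ hd
        | exact pvCase8 _ _ _ _ _ _ _ _ hd
        | exact pvCase9 _ _ _ _ _ _ _ _ _ hd
    · have hb : (decide (6 ≤ PySem.Chars.len l) && decide (PySem.Chars.len l ≤ 9)) = false := by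
        rw [PySem.Chars.len_eq] at hlen ⊢
        simp only [Bool.and_eq_false_iff, decide_eq_false_iff_not]
        omega
      simp only [pvCoreA, pvCoreB, hd, hb, if_neg hlen]
      simp

-- ===== VERDICT (by name: the statement is the Claim_ definition above) =====
theorem ranksFormCheck_spec : Claim_equal_ranksFormCheck := by
  intro s _
  unfold Spec_ranksFormCheck ranksFormCheck ranksFormCheck_alt
  exact core_eq _
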